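-- pv_equiv track=rewrite | github.com/tdodson0612/Algorithm-Visualizer | algo_visualizer.py | generate_dp_tree_steps
-- ===== SOURCE A (Python) =====
-- def generate_dp_tree_steps(arr):
--     # For simplicity, simulate a tree of 5 nodes, edges hardcoded
--     steps = []
--     n = 5
--     tree = {
--         0: [1, 2],
--         1: [3],
--         2: [4],
--         3: [],
--         4: []
--     }
--     dp = [0]*n
--     visited = [False]*n
--
--     def dfs(u):
--         visited[u] = True
--         total = arr[u] if u < len(arr) else 0
--         for v in tree.get(u, []):
--             if not visited[v]:
--                 dfs(v)
--             total += dp[v]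
--         dp[u] = total
--         steps.append(([u], dp[:]))
--
--     dfs(0)
--     return steps
-- ===== SOURCE B (Python) =====
-- def generate_dp_tree_steps(arr):
--     # Tree is hardcoded, so the post-order (3,1,4,2,0) and every dp snapshot
--     # can be written in closed form instead of running a recursive DFS.
--     def a(i):
--         return arr[i] if i < len(arr) else 0
--     dp3 = a(3)
--     dp1 = a(1) + dp3
--     dp4 = a(4)
--     dp2 = a(2) + dp4
--     dp0 = a(0) + dp1 + dp2
--     return [
--         ([3], [0, 0, 0, dp3, 0]),
--         ([1], [0, dp1, 0, dp3, 0]),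
--         ([4], [0, dp1, 0, dp3, dp4]),
--         ([2], [0, dp1, dp2, dp3, dp4]),
--         ([0], [dp0, dp1, dp2, dp3, dp4]),
--     ]
-- ===== Notes on version B (the rewrite author's own statement) =====
-- stated objective: simpler
-- what changed: Replaces the recursive DFS with mutable dp/visited state by the unrolled closed form: since the 5-node tree is hardcoded, B computes the five dp values directly and returns the five snapshots as literals in the fixed post-order 3,1,4,2,0.
import Mathlib
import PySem

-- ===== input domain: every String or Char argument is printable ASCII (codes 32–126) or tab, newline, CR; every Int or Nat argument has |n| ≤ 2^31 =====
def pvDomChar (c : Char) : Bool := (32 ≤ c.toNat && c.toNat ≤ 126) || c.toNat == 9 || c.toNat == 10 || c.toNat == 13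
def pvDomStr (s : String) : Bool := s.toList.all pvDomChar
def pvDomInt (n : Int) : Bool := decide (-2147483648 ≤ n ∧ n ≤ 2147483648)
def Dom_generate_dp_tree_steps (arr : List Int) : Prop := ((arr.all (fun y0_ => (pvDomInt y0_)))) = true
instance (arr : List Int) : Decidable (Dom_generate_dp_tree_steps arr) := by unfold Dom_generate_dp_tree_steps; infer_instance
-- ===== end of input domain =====

-- B replaces the recursive DFS by the unrolled closed form over the hardcoded 5-node tree (objective: simpler).

-- ===== PORT A =====
-- the hardcoded tree dict
def pvTreeA : PySem.Dict Int (List Int) := PySem.Dict.ofList [(0, [1, 2]), (1, [3]), (2, [4]), (3, []), (4, [])]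

-- dfs(u) transliterated; state = (dp, visited, steps); fuel bounds the recursion depth
-- (fuel 5 suffices for the fixed 5-node tree, a pure totality guard)
def pvDfsA (arr : List Int) :
    Nat → Int → List Int × List Bool × List (List Int × List Int) →
    List Int × List Bool × List (List Int × List Int)
  | 0, _, st => st
  | fuel + 1, u, (dp, visited, steps) =>
    let visited := visited.set u.toNat true
    let total0 : Int := if u < (arr.length : Int) then (PySem.List.pyGet? arr u).getD 0 else 0
    let children := (PySem.Dict.get? pvTreeA u).getD []
    let res := children.foldl
      (fun (acc : Int × List Int × List Bool × List (List Int × List Int)) v =>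
        let (total, dp, visited, steps) := acc
        let (dp, visited, steps) :=
          if (PySem.List.pyGet? visited v).getD false = false then
            pvDfsA arr fuel v (dp, visited, steps)
          else (dp, visited, steps)
        (total + (PySem.List.pyGet? dp v).getD 0, dp, visited, steps))
      (total0, dp, visited, steps)
    let (total, dp, visited, steps) := res
    let dp := dp.set u.toNat total
    (dp, visited, steps ++ [([u], dp)])

def generate_dp_tree_steps (arr : List Int) : List (List Int × List Int) :=
  (pvDfsA arr 5 0 (List.replicate 5 0, List.replicate 5 false, [])).2.2

-- ===== PORT B =====
-- arr[i] if i < len(arr) else 0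
def pvAt (arr : List Int) (i : Int) : Int :=
  if i < (arr.length : Int) then (PySem.List.pyGet? arr i).getD 0 else 0

def generate_dp_tree_steps_alt (arr : List Int) : List (List Int × List Int) :=
  let dp3 := pvAt arr 3
  let dp1 := pvAt arr 1 + dp3
  let dp4 := pvAt arr 4
  let dp2 := pvAt arr 2 + dp4
  let dp0 := pvAt arr 0 + dp1 + dp2
  [([3], [0, 0, 0, dp3, 0]),
   ([1], [0, dp1, 0, dp3, 0]),
   ([4], [0, dp1, 0, dp3, dp4]),
   ([2], [0, dp1, dp2, dp3, dp4]),
   ([0], [dp0, dp1, dp2, dp3, dp4])]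

-- ===== PRECONDITION & SPEC =====
def Spec_generate_dp_tree_steps (arr : List Int) (out : List (List Int × List Int)) : Prop := out = generate_dp_tree_steps_alt arr
instance (arr : List Int) (out : List (List Int × List Int)) : Decidable (Spec_generate_dp_tree_steps arr out) := by unfold Spec_generate_dp_tree_steps; infer_instance

-- ===== CLAIM (what is proved, stated in full; the proofs are below) =====
def Claim_equal_generate_dp_tree_steps : Prop := ∀ (arr : List Int), Dom_generate_dp_tree_steps arr → Spec_generate_dp_tree_steps arr (generate_dp_tree_steps arr)

-- ===== LEMMAS AND PROOFS =====

-- ===== VERDICT (by name: the statement is the Claim_ definition above) =====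
set_option maxHeartbeats 4000000 in
theorem generate_dp_tree_steps_spec : Claim_equal_generate_dp_tree_steps := by
  intro arr _
  unfold Spec_generate_dp_tree_steps generate_dp_tree_steps generate_dp_tree_steps_alt
  rfl
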